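-- pv_equiv track=rewrite | github.com/chbaravind04/os_in_python | fcfs_disk_scheduling.py | fcfs_disk_scheduling
-- ===== SOURCE A (Python) =====
-- def fcfs_disk_scheduling(initial_head, requests):
--     total_head_movement = 0
--
--     # Calculate head movement for each request
--     for i in range(len(requests)):
--         current_request = requests[i]
--         head_movement = abs(current_request - initial_head)
--         total_head_movement += head_movement
--         initial_head = current_request
--
--     return total_head_movement
-- ===== SOURCE B (Python) =====
-- def fcfs_disk_scheduling(initial_head, requests):
--     # Segment-sweep: total movement = sum over elementary segments between
--     # adjacent distinct positions of (segment length) * (number of moves crossing it).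
--     seq = [initial_head] + list(requests)
--     points = sorted(set(seq))
--     moves = list(zip(seq, seq[1:]))
--     total = 0
--     for p, q in zip(points, points[1:]):
--         crossings = 0
--         for a, b in moves:
--             if min(a, b) <= p and q <= max(a, b):
--                 crossings += 1
--         total += (q - p) * crossings
--     return total
-- ===== Notes on version B (the rewrite author's own statement) =====
-- stated objective: alternative
-- what changed: Replaces A's running-difference accumulation by a segment-sweep: sort the distinct positions, and for each elementary segment between adjacent sorted positions count how many moves cross it, summing length times crossing count.
import Mathlib
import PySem

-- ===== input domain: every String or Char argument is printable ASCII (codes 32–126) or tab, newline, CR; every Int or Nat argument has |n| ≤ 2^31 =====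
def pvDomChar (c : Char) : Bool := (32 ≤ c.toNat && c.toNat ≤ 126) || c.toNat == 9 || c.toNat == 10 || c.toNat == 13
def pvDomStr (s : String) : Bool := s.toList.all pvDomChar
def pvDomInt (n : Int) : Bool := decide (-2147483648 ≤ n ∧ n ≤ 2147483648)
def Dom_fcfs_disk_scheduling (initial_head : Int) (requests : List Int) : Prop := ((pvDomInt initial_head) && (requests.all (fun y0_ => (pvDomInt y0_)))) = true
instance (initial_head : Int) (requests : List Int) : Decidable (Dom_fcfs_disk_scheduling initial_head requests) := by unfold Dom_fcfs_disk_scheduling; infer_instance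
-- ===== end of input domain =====

-- B replaces A's running-difference accumulation by a segment-sweep over the sorted
-- distinct positions, counting how many moves cross each elementary segment (alternative algorithm).

-- ===== PORT A =====
-- A's for-loop carries (total_head_movement, initial_head) as mutable state; folded here.
def fcfs_disk_scheduling (initial_head : Int) (requests : List Int) : Int :=
  (requests.foldl (fun st current_request =>
      (st.1 + |current_request - st.2|, current_request)) (0, initial_head)).1

-- ===== PORT B =====
-- seq = [initial_head] + requests; points = sorted(set(seq)); moves = zip(seq, seq[1:]);
-- for each adjacent (p,q) of points count moves with min(a,b) <= p and q <= max(a,b).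
def fcfs_disk_scheduling_alt (initial_head : Int) (requests : List Int) : Int :=
  let seq : List Int := initial_head :: requests
  let points : List Int := PySem.List.sorted (PySem.Set.ofList seq) (fun x => x) false
  let moves : List (Int × Int) := seq.zip seq.tail
  (points.zip points.tail).foldl
    (fun total pq =>
      let crossings : Int := moves.foldl
        (fun c ab => if min ab.1 ab.2 ≤ pq.1 ∧ pq.2 ≤ max ab.1 ab.2 then c + 1 else c) 0
      total + (pq.2 - pq.1) * crossings) 0

-- ===== PRECONDITION & SPEC =====
def Spec_fcfs_disk_scheduling (initial_head : Int) (requests : List Int) (out : Int) : Prop := out = fcfs_disk_scheduling_alt initial_head requests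
instance (initial_head : Int) (requests : List Int) (out : Int) : Decidable (Spec_fcfs_disk_scheduling initial_head requests out) := by unfold Spec_fcfs_disk_scheduling; infer_instance

-- ===== CLAIM (what is proved, stated in full; the proofs are below) =====
def Claim_equal_fcfs_disk_scheduling : Prop := ∀ (initial_head : Int) (requests : List Int), Dom_fcfs_disk_scheduling initial_head requests → Spec_fcfs_disk_scheduling initial_head requests (fcfs_disk_scheduling initial_head requests)

-- ===== LEMMAS AND PROOFS =====

-- A's fold is the sum of |b - a| over consecutive pairs.
theorem fcfs_foldl_eq_zip_sum (requests : List Int) (h acc : Int) :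
    (requests.foldl (fun st current_request =>
        (st.1 + |current_request - st.2|, current_request)) (acc, h)).1
      = acc + (((h :: requests).zip requests).map (fun p => |p.2 - p.1|)).sum := by
  induction requests generalizing h acc with
  | nil => simp
  | cons r rs ih =>
    simp only [List.foldl_cons, List.zip_cons_cons, List.map_cons, List.sum_cons, ih]
    ring

-- generic: an accumulating fold of `t + g x` is a sum of a map
theorem foldl_add_map {α : Type} (L : List α) (g : α → Int) (acc : Int) :
    L.foldl (fun t x => t + g x) acc = acc + (L.map g).sum := by
  induction L generalizing acc with
  | nil => simp
  | cons x xs ih => simp [ih]; ring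

-- generic: a conditional counter fold is a sum of indicators
theorem foldl_count_eq_sum {α : Type} (L : List α) (P : α → Prop) [DecidablePred P] (c0 : Int) :
    L.foldl (fun c x => if P x then c + 1 else c) c0
      = c0 + (L.map (fun x => if P x then (1 : Int) else 0)).sum := by
  induction L generalizing c0 with
  | nil => simp
  | cons x xs ih =>
    by_cases h : P x
    · simp only [List.foldl_cons, if_pos h, List.map_cons, List.sum_cons, ih]; ring
    · simp only [List.foldl_cons, if_neg h, List.map_cons, List.sum_cons, ih]; ring

-- Telescoping: over a strictly increasing list containing lo and hi (lo ≤ hi),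
-- the elementary segments lying inside [lo, hi] sum to hi - lo.
theorem tele_sum : ∀ (pts : List Int) (lo hi : Int), List.Pairwise (· < ·) pts →
    lo ∈ pts → hi ∈ pts → lo ≤ hi →
    ((pts.zip pts.tail).map (fun s => if lo ≤ s.1 ∧ s.2 ≤ hi then s.2 - s.1 else 0)).sum
      = hi - lo := by
  intro pts
  induction pts with
  | nil => intro lo hi _ hlo; cases hlo
  | cons x rest ih =>
    intro lo hi hpw hlo hhi hle
    cases rest with
    | nil =>
      simp at hlo hhi
      simp [hlo, hhi]
    | cons y tl =>
      have hx : ∀ z ∈ y :: tl, x < z := fun z hz => (List.pairwise_cons.1 hpw).1 z hz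
      have hpw' : List.Pairwise (· < ·) (y :: tl) := (List.pairwise_cons.1 hpw).2
      simp only [List.tail_cons, List.zip_cons_cons, List.map_cons, List.sum_cons]
      rcases List.mem_cons.1 hhi with hhix | hhit
      · -- hi = x : lo = x too, everything excluded
        have hlox : lo = x := by
          rcases List.mem_cons.1 hlo with h | h
          · exact h
          · have := hx lo h; omega
        have h1 : ¬ (lo ≤ x ∧ y ≤ hi) := by
          have := hx y (by simp)
          omega
        have h2 : (((y :: tl).zip tl).map
            (fun s => if lo ≤ s.1 ∧ s.2 ≤ hi then s.2 - s.1 else 0)).sum = 0 := by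
          apply List.sum_eq_zero
          intro v hv
          rcases List.mem_map.1 hv with ⟨s, hs, hsv⟩
          have hs2 : s.2 ∈ tl := (List.of_mem_zip hs).2
          have : y < s.2 := (List.pairwise_cons.1 hpw').1 _ hs2
          have hxy := hx y (by simp)
          have : ¬ (lo ≤ s.1 ∧ s.2 ≤ hi) := by omega
          rw [← hsv]; simp [this]
        rw [h2, if_neg h1]
        omega
      · -- hi ∈ y :: tl
        have hyhi : y ≤ hi := by
          rcases List.mem_cons.1 hhit with h | h
          · omega
          · have := (List.pairwise_cons.1 hpw').1 hi h; omega
        rcases List.mem_cons.1 hlo with hlox | hlot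
        · -- lo = x : first segment counted, tail telescopes from y
          have hxy := hx y (by simp)
          have h1 : lo ≤ x ∧ y ≤ hi := by constructor <;> omega
          have hcongr : (((y :: tl).zip tl).map
                (fun s => if lo ≤ s.1 ∧ s.2 ≤ hi then s.2 - s.1 else 0))
              = (((y :: tl).zip tl).map
                (fun s => if y ≤ s.1 ∧ s.2 ≤ hi then s.2 - s.1 else 0)) := by
            apply List.map_congr_left
            intro s hs
            have hs1 : s.1 ∈ y :: tl := (List.of_mem_zip hs).1
            have hys1 : y ≤ s.1 := by
              rcases List.mem_cons.1 hs1 with h | h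
              · omega
              · have := (List.pairwise_cons.1 hpw').1 _ h; omega
            have hlos1 : lo ≤ s.1 := by omega
            simp [hlos1, hys1]
          have hih := ih y hi hpw' (by simp) hhit hyhi
          simp only [List.tail_cons] at hih
          rw [if_pos h1, hcongr, hih]
          omega
        · -- lo ∈ y :: tl : first segment excluded
          have hxlo := hx lo hlot
          have h1 : ¬ (lo ≤ x ∧ y ≤ hi) := by omega
          have hih := ih lo hi hpw' hlot hhit hle
          simp only [List.tail_cons] at hih
          rw [if_neg h1, hih]
          omega

-- Exchange the two sums: total over segments of length * crossings = sum of |b - a| over moves,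
-- provided every move endpoint is one of the points.
theorem sweep_eq_sum (pts : List Int) (hpw : List.Pairwise (· < ·) pts) :
    ∀ (M : List (Int × Int)), (∀ m ∈ M, m.1 ∈ pts ∧ m.2 ∈ pts) →
    ((pts.zip pts.tail).map (fun s => (s.2 - s.1) *
        (M.map (fun m => if min m.1 m.2 ≤ s.1 ∧ s.2 ≤ max m.1 m.2 then (1 : Int) else 0)).sum)).sum
      = (M.map (fun m => |m.2 - m.1|)).sum := by
  intro M
  induction M with
  | nil => simp
  | cons m Ms ih =>
    intro hmem
    have hm := hmem m (by simp)
    have hMs := fun x hx => hmem x (List.mem_cons_of_mem _ hx)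
    have hsplit : ∀ s : Int × Int,
        (s.2 - s.1) * (((m :: Ms).map (fun m => if min m.1 m.2 ≤ s.1 ∧ s.2 ≤ max m.1 m.2 then (1 : Int) else 0)).sum)
          = (if min m.1 m.2 ≤ s.1 ∧ s.2 ≤ max m.1 m.2 then s.2 - s.1 else 0)
            + (s.2 - s.1) * ((Ms.map (fun m => if min m.1 m.2 ≤ s.1 ∧ s.2 ≤ max m.1 m.2 then (1 : Int) else 0)).sum) := by
      intro s
      simp only [List.map_cons, List.sum_cons]
      by_cases h : min m.1 m.2 ≤ s.1 ∧ s.2 ≤ max m.1 m.2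
      · rw [if_pos h, if_pos h]; ring
      · rw [if_neg h, if_neg h]; ring
    calc ((pts.zip pts.tail).map (fun s => (s.2 - s.1) *
            (((m :: Ms)).map (fun m => if min m.1 m.2 ≤ s.1 ∧ s.2 ≤ max m.1 m.2 then (1 : Int) else 0)).sum)).sum
        = ((pts.zip pts.tail).map (fun s =>
            (if min m.1 m.2 ≤ s.1 ∧ s.2 ≤ max m.1 m.2 then s.2 - s.1 else 0)
            + (s.2 - s.1) * ((Ms.map (fun m => if min m.1 m.2 ≤ s.1 ∧ s.2 ≤ max m.1 m.2 then (1 : Int) else 0)).sum))).sum := by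
          exact congrArg List.sum (List.map_congr_left (fun s _ => hsplit s))
      _ = ((pts.zip pts.tail).map (fun s =>
            if min m.1 m.2 ≤ s.1 ∧ s.2 ≤ max m.1 m.2 then s.2 - s.1 else 0)).sum
          + ((pts.zip pts.tail).map (fun s => (s.2 - s.1) *
            ((Ms.map (fun m => if min m.1 m.2 ≤ s.1 ∧ s.2 ≤ max m.1 m.2 then (1 : Int) else 0)).sum))).sum := by
          rw [← List.sum_map_add]
      _ = |m.2 - m.1| + (Ms.map (fun m => |m.2 - m.1|)).sum := by
          have hlo : min m.1 m.2 ∈ pts := by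
            rcases min_choice m.1 m.2 with h | h <;> rw [h]
            · exact hm.1
            · exact hm.2
          have hhi : max m.1 m.2 ∈ pts := by
            rcases max_choice m.1 m.2 with h | h <;> rw [h]
            · exact hm.1
            · exact hm.2
          rw [tele_sum pts (min m.1 m.2) (max m.1 m.2) hpw hlo hhi (min_le_max), ih hMs]
          have : max m.1 m.2 - min m.1 m.2 = |m.2 - m.1| := by
            rcases le_total m.1 m.2 with h | h
            · rw [max_eq_right h, min_eq_left h, abs_of_nonneg (by omega)]
            · rw [max_eq_left h, min_eq_right h, abs_of_nonpos (by omega)]; ring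
          rw [this]
      _ = (((m :: Ms)).map (fun m => |m.2 - m.1|)).sum := by simp

-- ===== VERDICT (by name: the statement is the Claim_ definition above) =====
theorem fcfs_disk_scheduling_spec : Claim_equal_fcfs_disk_scheduling := by
  intro h rs _
  show fcfs_disk_scheduling h rs = fcfs_disk_scheduling_alt h rs
  have hA : fcfs_disk_scheduling h rs
      = (((h :: rs).zip rs).map (fun p => |p.2 - p.1|)).sum := by
    simp only [fcfs_disk_scheduling]
    rw [fcfs_foldl_eq_zip_sum, zero_add]
  have hpw : List.Pairwise (· < ·)
      (PySem.List.sorted (PySem.Set.ofList (h :: rs)) (fun x => x) false) :=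
    PySem.List.sorted_ofList_pairwise_lt (h :: rs)
  have hmemseq : ∀ x ∈ (h :: rs),
      x ∈ PySem.List.sorted (PySem.Set.ofList (h :: rs)) (fun x => x) false := by
    intro x hx
    rw [PySem.List.mem_sorted]
    exact (PySem.Set.mem_ofList (h :: rs) x).2 hx
  have hmoves : ∀ m ∈ (h :: rs).zip rs,
      m.1 ∈ PySem.List.sorted (PySem.Set.ofList (h :: rs)) (fun x => x) false ∧
      m.2 ∈ PySem.List.sorted (PySem.Set.ofList (h :: rs)) (fun x => x) false := by
    intro m hm
    exact ⟨hmemseq _ (List.of_mem_zip hm).1,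
           hmemseq _ (List.mem_cons_of_mem _ (List.of_mem_zip hm).2)⟩
  have halt : fcfs_disk_scheduling_alt h rs
      = ((((PySem.List.sorted (PySem.Set.ofList (h :: rs)) (fun x => x) false)).zip
            ((PySem.List.sorted (PySem.Set.ofList (h :: rs)) (fun x => x) false)).tail).map
          (fun pq => (pq.2 - pq.1) *
            ((h :: rs).zip rs).foldl
              (fun c ab => if min ab.1 ab.2 ≤ pq.1 ∧ pq.2 ≤ max ab.1 ab.2 then c + 1 else c)
              0)).sum := by
    simp only [fcfs_disk_scheduling_alt, List.tail_cons]
    rw [foldl_add_map, zero_add]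
  rw [hA, halt,
    ← sweep_eq_sum (PySem.List.sorted (PySem.Set.ofList (h :: rs)) (fun x => x) false)
      hpw ((h :: rs).zip rs) hmoves]
  refine congrArg List.sum (List.map_congr_left (fun pq _ => ?_))
  rw [foldl_count_eq_sum ((h :: rs).zip rs)
    (fun ab => min ab.1 ab.2 ≤ pq.1 ∧ pq.2 ≤ max ab.1 ab.2) 0, zero_add]
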